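-- pv_equiv track=rewrite | github.com/sprenkamp/HackerRankTestPython | aeroplane1.py | solution
-- ===== SOURCE A (Python) =====
-- def solution(N, S):
--     available=0
--     occupied=[]
--
--     s = S.split(" ")
--     for i in range(1,N+1):
--
--         seatA = str(i)+'A'
--
--         if (str(i)+'A' not in s) and (str(i)+'B' not in s) and (str(i)+'C' not in s) :
--             available = available + 1
--         if (str(i)+'D' not in s) and (str(i)+'E' not in s) and (str(i)+'F' not in s) and (str(i)+'G' not in s):
--             available = available + 1
--         if (str(i)+'H' not in s) and (str(i)+'J' not in s) and (str(i)+'K' not in s):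
--             available = available + 1
--
--     result = available
--     return result
-- ===== SOURCE B (Python) =====
-- def solution(N, S):
--     BLOCK = {'A': 0, 'B': 0, 'C': 0,
--              'D': 1, 'E': 1, 'F': 1, 'G': 1,
--              'H': 2, 'J': 2, 'K': 2}
--     rows = {str(i) for i in range(1, N + 1)}
--     occ = set()
--     for t in S.split(" "):
--         if t and t[-1] in BLOCK and t[:-1] in rows:
--             occ.add((t[:-1], BLOCK[t[-1]]))
--     return 3 * max(N, 0) - len(occ)
-- ===== Notes on version B (the rewrite author's own statement) =====
-- stated objective: faster
-- what changed: A scans the whole token list with up to ten string comparisons for every row (O(N*M)); B makes one pass over the occupied-seat tokens, maps each valid token to its (row, block) pair via a letter->block dict and a precomputed set of row names, and returns 3*max(N,0) minus the number of distinct occupied blocks.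
import Mathlib
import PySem

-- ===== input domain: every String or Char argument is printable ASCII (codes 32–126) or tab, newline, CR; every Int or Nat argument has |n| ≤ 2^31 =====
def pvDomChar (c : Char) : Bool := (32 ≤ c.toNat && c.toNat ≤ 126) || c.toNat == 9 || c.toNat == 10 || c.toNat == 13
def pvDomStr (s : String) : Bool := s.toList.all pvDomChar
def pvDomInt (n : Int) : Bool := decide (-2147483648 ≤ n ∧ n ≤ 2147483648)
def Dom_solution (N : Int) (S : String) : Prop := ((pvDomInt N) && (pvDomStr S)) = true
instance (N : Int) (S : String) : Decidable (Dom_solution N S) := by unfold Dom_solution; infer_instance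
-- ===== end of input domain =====

-- B replaces A's per-row scans of the token list (O(N·M) string comparisons) by one pass over the
-- occupied-seat tokens against a precomputed row-name set, giving 3·max(N,0) − #occupied blocks.

-- ===== PORT A =====
-- s = S.split(" "): sep " " is nonempty, so Python never raises; split? " " = some (splitOn) — we call splitOn directly.
-- (the dead locals `occupied` and `seatA` of A are omitted; 'str(i) + <letter>' is PySem.Int.toChars i ++ [<letter>];
--  'x not in s' on the list of tokens is !(s.contains x))
def solution (N : Int) (S : String) : Int :=
  let s := PySem.Chars.splitOn S.toList [' ']
  (PySem.List.pyRange 1 (N + 1) 1).foldl (fun available i =>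
    let available := if !(s.contains (PySem.Int.toChars i ++ ['A'])) && !(s.contains (PySem.Int.toChars i ++ ['B'])) && !(s.contains (PySem.Int.toChars i ++ ['C'])) then available + 1 else available
    let available := if !(s.contains (PySem.Int.toChars i ++ ['D'])) && !(s.contains (PySem.Int.toChars i ++ ['E'])) && !(s.contains (PySem.Int.toChars i ++ ['F'])) && !(s.contains (PySem.Int.toChars i ++ ['G'])) then available + 1 else available
    let available := if !(s.contains (PySem.Int.toChars i ++ ['H'])) && !(s.contains (PySem.Int.toChars i ++ ['J'])) && !(s.contains (PySem.Int.toChars i ++ ['K'])) then available + 1 else available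
    available) 0

-- ===== PORT B =====
def pvBLOCK : PySem.Dict Char Int :=
  PySem.Dict.ofList [('A',0),('B',0),('C',0),('D',1),('E',1),('F',1),('G',1),('H',2),('J',2),('K',2)]

-- 'if t and t[-1] in BLOCK and t[:-1] in rows' — t[-1] on a non-empty t is t.getLast? (PySem.List.pyGet?_neg_one),
-- t[:-1] is t.dropLast (PySem.List.slice_to_neg_one); the empty token short-circuits at `if t`, here getLast? = none.
def solution_alt (N : Int) (S : String) : Int :=
  let rows : PySem.Set (List Char) :=
    PySem.Set.ofList ((PySem.List.pyRange 1 (N + 1) 1).map PySem.Int.toChars)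
  let occ : PySem.Set (List Char × Int) :=
    (PySem.Chars.splitOn S.toList [' ']).foldl (fun occ t =>
      match t.getLast? with
      | none => occ
      | some L =>
        if pvBLOCK.contains L && PySem.Set.contains rows t.dropLast then
          PySem.Set.add occ (t.dropLast, pvBLOCK.getD L 0)
        else occ) PySem.Set.empty
  3 * max N 0 - PySem.Set.len occ

-- ===== PRECONDITION & SPEC =====
def Spec_solution (N : Int) (S : String) (out : Int) : Prop := out = solution_alt N S
instance (N : Int) (S : String) (out : Int) : Decidable (Spec_solution N S out) := by unfold Spec_solution; infer_instance

-- ===== CLAIM (what is proved, stated in full; the proofs are below) =====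
def Claim_equal_solution : Prop := ∀ (N : Int) (S : String), Dom_solution N S → Spec_solution N S (solution N S)

-- ===== LEMMAS AND PROOFS =====

-- ===== proof helpers =====
def pvLetters (b : Int) : List Char :=
  if b = 0 then ['A','B','C'] else if b = 1 then ['D','E','F','G'] else ['H','J','K']

def pvOcc (s : List (List Char)) (i b : Int) : Bool :=
  (pvLetters b).any (fun L => s.contains (PySem.Int.toChars i ++ [L]))

def pvRow (s : List (List Char)) (i : Int) : List (List Char × Int) :=
  (([0,1,2] : List Int).filter (fun b => pvOcc s i b)).map (fun b => (PySem.Int.toChars i, b))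

def pvM (s : List (List Char)) (l : List Int) : List (List Char × Int) :=
  l.flatMap (pvRow s)

theorem pvRow_step (s : List (List Char)) (i : Int) :
    ((if !(pvOcc s i 0) then (1:Int) else 0) + (if !(pvOcc s i 1) then 1 else 0)
      + (if !(pvOcc s i 2) then 1 else 0)) = 3 - (pvRow s i).length := by
  cases h0 : pvOcc s i 0 <;> cases h1 : pvOcc s i 1 <;> cases h2 : pvOcc s i 2 <;>
    simp [pvRow, List.filter, h0, h1, h2]

theorem pvSum (s : List (List Char)) (l : List Int) :
    (l.map (fun i => (3:Int) - (pvRow s i).length)).sum = 3 * l.length - (pvM s l).length := by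
  induction l with
  | nil => simp [pvM]
  | cons x xs ih =>
    have : pvM s (x :: xs) = pvRow s x ++ pvM s xs := by simp [pvM]
    rw [List.map_cons, List.sum_cons, ih, this, List.length_append, List.length_cons]
    push_cast
    ring

theorem pvA_foldl (s : List (List Char)) (l : List Int) (a : Int) :
    l.foldl (fun available i =>
      let available := if !(s.contains (PySem.Int.toChars i ++ ['A'])) && !(s.contains (PySem.Int.toChars i ++ ['B'])) && !(s.contains (PySem.Int.toChars i ++ ['C'])) then available + 1 else available
      let available := if !(s.contains (PySem.Int.toChars i ++ ['D'])) && !(s.contains (PySem.Int.toChars i ++ ['E'])) && !(s.contains (PySem.Int.toChars i ++ ['F'])) && !(s.contains (PySem.Int.toChars i ++ ['G'])) then available + 1 else available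
      let available := if !(s.contains (PySem.Int.toChars i ++ ['H'])) && !(s.contains (PySem.Int.toChars i ++ ['J'])) && !(s.contains (PySem.Int.toChars i ++ ['K'])) then available + 1 else available
      available) a
    = a + 3 * l.length - (pvM s l).length := by
  have hcong : l.foldl (fun available i =>
      let available := if !(s.contains (PySem.Int.toChars i ++ ['A'])) && !(s.contains (PySem.Int.toChars i ++ ['B'])) && !(s.contains (PySem.Int.toChars i ++ ['C'])) then available + 1 else available
      let available := if !(s.contains (PySem.Int.toChars i ++ ['D'])) && !(s.contains (PySem.Int.toChars i ++ ['E'])) && !(s.contains (PySem.Int.toChars i ++ ['F'])) && !(s.contains (PySem.Int.toChars i ++ ['G'])) then available + 1 else available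
      let available := if !(s.contains (PySem.Int.toChars i ++ ['H'])) && !(s.contains (PySem.Int.toChars i ++ ['J'])) && !(s.contains (PySem.Int.toChars i ++ ['K'])) then available + 1 else available
      available) a
      = l.foldl (fun acc i => acc + ((3:Int) - (pvRow s i).length)) a := by
    apply PySem.List.foldl_congr_mem
    intro acc x hx
    have h0 : (!(s.contains (PySem.Int.toChars x ++ ['A'])) && !(s.contains (PySem.Int.toChars x ++ ['B'])) && !(s.contains (PySem.Int.toChars x ++ ['C']))) = !(pvOcc s x 0) := by
      simp [pvOcc, pvLetters, Bool.and_assoc]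
    have h1 : (!(s.contains (PySem.Int.toChars x ++ ['D'])) && !(s.contains (PySem.Int.toChars x ++ ['E'])) && !(s.contains (PySem.Int.toChars x ++ ['F'])) && !(s.contains (PySem.Int.toChars x ++ ['G']))) = !(pvOcc s x 1) := by
      simp [pvOcc, pvLetters, Bool.and_assoc]
    have h2 : (!(s.contains (PySem.Int.toChars x ++ ['H'])) && !(s.contains (PySem.Int.toChars x ++ ['J'])) && !(s.contains (PySem.Int.toChars x ++ ['K']))) = !(pvOcc s x 2) := by
      simp [pvOcc, pvLetters, Bool.and_assoc]
    simp only [h0, h1, h2]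
    rw [← pvRow_step s x]
    cases pvOcc s x 0 <;> cases pvOcc s x 1 <;> cases pvOcc s x 2 <;> simp <;> ring
  rw [hcong, PySem.List.foldl_add, pvSum]
  ring


theorem pvDigitChar_inj {m n : Nat} (hm : m < 10) (hn : n < 10)
    (h : Nat.digitChar m = Nat.digitChar n) : m = n := by
  interval_cases m <;> interval_cases n <;> simp_all [Nat.digitChar]

theorem pvToDigits_inj : ∀ (m n : Nat), Nat.toDigits 10 m = Nat.toDigits 10 n → m = n := by
  intro m
  induction m using Nat.strong_induction_on with
  | _ m ih =>
    intro n h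
    rw [Nat.toDigits_eq_if (n:=m) (by norm_num), Nat.toDigits_eq_if (n:=n) (by norm_num)] at h
    by_cases h1 : m < 10 <;> by_cases h2 : n < 10
    · rw [if_pos h1, if_pos h2] at h
      exact pvDigitChar_inj h1 h2 (by simpa using h)
    · exfalso
      rw [if_pos h1, if_neg h2] at h
      have hl := congrArg List.length h
      simp [List.length_append] at hl
      have := @Nat.length_toDigits_pos 10 (n / 10)
      rw [hl] at this
      simp at this
    · exfalso
      rw [if_neg h1, if_pos h2] at h
      have hl := congrArg List.length h
      simp [List.length_append] at hl
      have := @Nat.length_toDigits_pos 10 (m / 10)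
      rw [hl] at this
      simp at this
    · rw [if_neg h1, if_neg h2] at h
      have hr := congrArg List.reverse h
      simp only [List.reverse_append, List.reverse_cons, List.reverse_nil, List.nil_append,
        List.singleton_append, List.cons.injEq] at hr
      obtain ⟨hc, hrest⟩ := hr
      have hmod : m % 10 = n % 10 :=
        pvDigitChar_inj (Nat.mod_lt _ (by norm_num)) (Nat.mod_lt _ (by norm_num)) hc
      have hdiv : m / 10 = n / 10 :=
        ih (m / 10) (Nat.div_lt_self (by omega) (by norm_num)) _
          (List.reverse_injective (by simpa using hrest))
      omega

theorem pvToChars_inj {i j : Int} (hi : 0 ≤ i) (hj : 0 ≤ j)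
    (h : PySem.Int.toChars i = PySem.Int.toChars j) : i = j := by
  unfold PySem.Int.toChars at h
  rw [if_neg (by omega), if_neg (by omega)] at h
  have := pvToDigits_inj _ _ h
  omega

theorem pvBLOCK_eq : pvBLOCK = PySem.Dict.mk [('A',0),('B',0),('C',0),('D',1),('E',1),('F',1),('G',1),('H',2),('J',2),('K',2)] := by decide

theorem pvBLOCK_mem' (L : Char) :
    pvBLOCK.contains L = true ↔ L ∈ (['A','B','C','D','E','F','G','H','J','K'] : List Char) := by
  rw [pvBLOCK_eq]
  simp [PySem.Dict.contains_mk]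
  tauto

theorem pvBLOCK_cases (L : Char) (h : pvBLOCK.contains L = true) :
    L ∈ pvLetters (pvBLOCK.getD L 0) ∧ pvBLOCK.getD L 0 ∈ ([0,1,2] : List Int) := by
  have hm := (pvBLOCK_mem' L).1 h
  fin_cases hm <;> decide

theorem pvBLOCK_of_letter {b : Int} (hb : b ∈ ([0,1,2] : List Int)) {L : Char}
    (hL : L ∈ pvLetters b) :
    pvBLOCK.contains L = true ∧ pvBLOCK.getD L 0 = b := by
  fin_cases hb <;>
    · simp [pvLetters] at hL
      first
      | (rcases hL with rfl|rfl|rfl <;> decide)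
      | (rcases hL with rfl|rfl|rfl|rfl <;> decide)

theorem pvOccFold_mem (rows : PySem.Set (List Char)) (l : List (List Char))
    (occ : PySem.Set (List Char × Int)) (hocc : occ.Nodup) (y : List Char × Int) :
    (y ∈ l.foldl (fun occ t =>
      match t.getLast? with
      | none => occ
      | some L =>
        if pvBLOCK.contains L && PySem.Set.contains rows t.dropLast then
          PySem.Set.add occ (t.dropLast, pvBLOCK.getD L 0)
        else occ) occ
    ↔ y ∈ occ ∨ ∃ t ∈ l, ∃ L, t.getLast? = some L ∧
        (pvBLOCK.contains L && PySem.Set.contains rows t.dropLast) = true ∧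
        y = (t.dropLast, pvBLOCK.getD L 0))
    ∧ (l.foldl (fun occ t =>
      match t.getLast? with
      | none => occ
      | some L =>
        if pvBLOCK.contains L && PySem.Set.contains rows t.dropLast then
          PySem.Set.add occ (t.dropLast, pvBLOCK.getD L 0)
        else occ) occ).Nodup := by
  induction l generalizing occ with
  | nil => simpa using hocc
  | cons t ts ih =>
    simp only [List.foldl_cons]
    cases hL : t.getLast? with
    | none =>
      refine ⟨((ih occ hocc).1).trans ?_, (ih occ hocc).2⟩
      simp only [List.mem_cons]
      constructor
      · rintro (h | ⟨t', ht', hrest⟩)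
        · exact Or.inl h
        · exact Or.inr ⟨t', Or.inr ht', hrest⟩
      · rintro (h | ⟨t', (rfl | ht'), hrest⟩)
        · exact Or.inl h
        · exfalso; obtain ⟨L, hsome, -⟩ := hrest; rw [hL] at hsome; cases hsome
        · exact Or.inr ⟨t', ht', hrest⟩
    | some L =>
      by_cases hc : (pvBLOCK.contains L && PySem.Set.contains rows t.dropLast) = true
      · simp only [hc, if_true]
        have hnd : (PySem.Set.add occ (t.dropLast, pvBLOCK.getD L 0)).Nodup :=
          PySem.Set.nodup_add _ _ hocc
        refine ⟨((ih _ hnd).1).trans ?_, (ih _ hnd).2⟩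
        rw [PySem.Set.mem_add]
        simp only [List.mem_cons]
        constructor
        · rintro ((h | rfl) | ⟨t', ht', hrest⟩)
          · exact Or.inl h
          · exact Or.inr ⟨t, Or.inl rfl, L, hL, hc, rfl⟩
          · exact Or.inr ⟨t', Or.inr ht', hrest⟩
        · rintro (h | ⟨t', (rfl | ht'), L', hsome, hc', rfl⟩)
          · exact Or.inl (Or.inl h)
          · rw [hL] at hsome; cases hsome; exact Or.inl (Or.inr rfl)
          · exact Or.inr ⟨t', ht', L', hsome, hc', rfl⟩
      · simp only [hc]
        refine ⟨((ih occ hocc).1).trans ?_, (ih occ hocc).2⟩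
        simp only [List.mem_cons]
        constructor
        · rintro (h | ⟨t', ht', hrest⟩)
          · exact Or.inl h
          · exact Or.inr ⟨t', Or.inr ht', hrest⟩
        · rintro (h | ⟨t', (rfl | ht'), L', hsome, hc', rfl⟩)
          · exact Or.inl h
          · rw [hL] at hsome; cases hsome; exact absurd hc' hc
          · exact Or.inr ⟨t', ht', L', hsome, hc', rfl⟩

theorem pvRow_mem (s : List (List Char)) (i : Int) (y : List Char × Int) :
    y ∈ pvRow s i ↔ ∃ b ∈ ([0,1,2] : List Int), pvOcc s i b = true ∧ y = (PySem.Int.toChars i, b) := by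
  simp only [pvRow, List.mem_map, List.mem_filter]
  constructor
  · rintro ⟨b, ⟨hb, hocc⟩, rfl⟩; exact ⟨b, hb, hocc, rfl⟩
  · rintro ⟨b, hb, hocc, rfl⟩; exact ⟨b, ⟨hb, hocc⟩, rfl⟩

theorem pvM_mem (s : List (List Char)) (l : List Int) (y : List Char × Int) :
    y ∈ pvM s l ↔ ∃ i ∈ l, ∃ b ∈ ([0,1,2] : List Int), pvOcc s i b = true ∧ y = (PySem.Int.toChars i, b) := by
  simp only [pvM, List.mem_flatMap, pvRow_mem]

theorem pvM_nodup (s : List (List Char)) (l : List Int) (hnd : l.Nodup)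
    (hpos : ∀ i ∈ l, 0 ≤ i) : (pvM s l).Nodup := by
  induction l with
  | nil => simp [pvM]
  | cons x xs ih =>
    rw [show pvM s (x :: xs) = pvRow s x ++ pvM s xs from by simp [pvM]]
    rcases List.nodup_cons.1 hnd with ⟨hx, hxs⟩
    refine List.Nodup.append ?_ (ih hxs (fun i hi => hpos i (List.mem_cons_of_mem _ hi))) ?_
    · refine List.Nodup.map_on (fun b _ b' _ h => ?_) (List.Nodup.filter _ (by decide))
      simpa using congrArg Prod.snd h
    · rw [List.disjoint_left]
      intro y hy1 hy2
      rw [pvRow_mem] at hy1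
      rw [pvM_mem] at hy2
      obtain ⟨b, hb, -, rfl⟩ := hy1
      obtain ⟨i, hi, b', hb', -, heq⟩ := hy2
      have hfst : PySem.Int.toChars x = PySem.Int.toChars i := congrArg Prod.fst heq
      have : x = i := pvToChars_inj (hpos x (List.mem_cons_self)) (hpos i (List.mem_cons_of_mem _ hi)) hfst
      exact hx (this ▸ hi)

theorem pvMemEquiv (N : Int) (s : List (List Char)) (y : List Char × Int) :
    (∃ t ∈ s, ∃ L, t.getLast? = some L ∧
        (pvBLOCK.contains L && PySem.Set.contains
          (PySem.Set.ofList ((PySem.List.pyRange 1 (N + 1) 1).map PySem.Int.toChars)) t.dropLast) = true ∧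
        y = (t.dropLast, pvBLOCK.getD L 0))
    ↔ y ∈ pvM s (PySem.List.pyRange 1 (N + 1) 1) := by
  rw [pvM_mem]
  constructor
  · rintro ⟨t, ht, L, hsome, hcond, rfl⟩
    rw [Bool.and_eq_true] at hcond
    obtain ⟨hBL, hrows⟩ := hcond
    have hne : t ≠ [] := by rintro rfl; simp at hsome
    have hlast : t.getLast hne = L := by
      have := List.getLast?_eq_some_getLast hne
      rw [this] at hsome
      exact Option.some.inj hsome
    have ht' : t.dropLast ++ [L] = t := by
      conv_rhs => rw [← List.dropLast_concat_getLast hne]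
      rw [hlast]
    rw [PySem.Set.contains_iff, PySem.Set.mem_ofList, List.mem_map] at hrows
    obtain ⟨i, hiR, hdrop⟩ := hrows
    obtain ⟨hL1, hb2⟩ := pvBLOCK_cases L hBL
    refine ⟨i, hiR, pvBLOCK.getD L 0, hb2, ?_, by rw [hdrop]⟩
    simp only [pvOcc, List.any_eq_true]
    refine ⟨L, hL1, ?_⟩
    rw [List.contains_iff_mem, hdrop, ht']
    exact ht
  · rintro ⟨i, hiR, b, hb, hocc, rfl⟩
    simp only [pvOcc, List.any_eq_true, List.contains_iff_mem] at hocc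
    obtain ⟨L, hLb, hmem⟩ := hocc
    obtain ⟨hBL, hgetD⟩ := pvBLOCK_of_letter hb hLb
    refine ⟨PySem.Int.toChars i ++ [L], hmem, L, List.getLast?_concat, ?_, ?_⟩
    · rw [Bool.and_eq_true]
      refine ⟨hBL, ?_⟩
      rw [PySem.Set.contains_iff, PySem.Set.mem_ofList, List.dropLast_concat, List.mem_map]
      exact ⟨i, hiR, rfl⟩
    · rw [List.dropLast_concat, hgetD]

theorem solution_pv_main : ∀ (N : Int) (S : String), solution N S = solution_alt N S := by
  intro N S
  simp only [solution, solution_alt]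
  rw [pvA_foldl]
  have hfold := pvOccFold_mem
    (PySem.Set.ofList ((PySem.List.pyRange 1 (N + 1) 1).map PySem.Int.toChars))
    (PySem.Chars.splitOn S.toList [' ']) PySem.Set.empty (by simp [PySem.Set.empty])
  have hperm : (pvM (PySem.Chars.splitOn S.toList [' ']) (PySem.List.pyRange 1 (N + 1) 1)).Perm
      ((PySem.Chars.splitOn S.toList [' ']).foldl (fun occ t =>
        match t.getLast? with
        | none => occ
        | some L =>
          if pvBLOCK.contains L && PySem.Set.contains
              (PySem.Set.ofList ((PySem.List.pyRange 1 (N + 1) 1).map PySem.Int.toChars)) t.dropLast then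
            PySem.Set.add occ (t.dropLast, pvBLOCK.getD L 0)
          else occ) PySem.Set.empty) := by
    rw [List.perm_ext_iff_of_nodup
      (pvM_nodup _ _ (PySem.List.nodup_pyRange_one 1 (N+1))
        (fun i hi => by have := PySem.List.mem_pyRange_one.1 hi; omega))
      (hfold ([], 0)).2]
    intro y
    rw [(hfold y).1]
    rw [← pvMemEquiv N (PySem.Chars.splitOn S.toList [' ']) y]
    simp [PySem.Set.empty]
  rw [PySem.Set.len, ← hperm.length_eq, PySem.List.length_pyRange_one]
  have : ((N + 1 - 1).toNat : Int) = max N 0 := by rw [Int.toNat_eq_max]; ring_nf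
  omega

-- ===== VERDICT (by name: the statement is the Claim_ definition above) =====
theorem solution_spec : Claim_equal_solution := by
  intro N S _
  exact solution_pv_main N S
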